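-- pv_equiv track=rewrite | github.com/alanmaydwell/prune-music-filenames | prune_music_filenames.py | find_wanted_filename
-- ===== SOURCE A (Python) =====
-- def find_wanted_filename(filename, skip_digits=0):
--     """Look for digit in string, if found, return the part of the string
--     from the digit onwards, otherwise return the original string.
--     Also option to ignore number of digits, so can be part of string from
--     nth digit.
--
--     Args:
--         filename - the string to be processed
--         skip_digits (int) - optional number of digits to skip
--     """
--     wanted = filename
--     for i, c in enumerate(filename):
--         if c.isdigit():
--             if skip_digits < 1:
--                 wanted = filename[i:]
--                 break
--             else:
--                 skip_digits -= 1
--     return wanted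
-- ===== SOURCE B (Python) =====
-- def find_wanted_filename(filename, skip_digits=0):
--     """Collect all digit positions first, then index into that list:
--     return the substring from the (skip_digits)-th digit onward (negative
--     skips count as 0), or the original string if there are not enough digits."""
--     positions = [i for i, c in enumerate(filename) if c.isdigit()]
--     idx = skip_digits if skip_digits >= 1 else 0
--     if idx < len(positions):
--         return filename[positions[idx]:]
--     return filename
-- ===== Notes on version B (the rewrite author's own statement) =====
-- stated objective: alternative
-- what changed: A's fused single scan with a decrementing skip counter and early break is replaced by a collect-then-index decomposition: build the list of all digit positions, clamp skip_digits to 0, and slice at that position if it exists.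
import Mathlib
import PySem

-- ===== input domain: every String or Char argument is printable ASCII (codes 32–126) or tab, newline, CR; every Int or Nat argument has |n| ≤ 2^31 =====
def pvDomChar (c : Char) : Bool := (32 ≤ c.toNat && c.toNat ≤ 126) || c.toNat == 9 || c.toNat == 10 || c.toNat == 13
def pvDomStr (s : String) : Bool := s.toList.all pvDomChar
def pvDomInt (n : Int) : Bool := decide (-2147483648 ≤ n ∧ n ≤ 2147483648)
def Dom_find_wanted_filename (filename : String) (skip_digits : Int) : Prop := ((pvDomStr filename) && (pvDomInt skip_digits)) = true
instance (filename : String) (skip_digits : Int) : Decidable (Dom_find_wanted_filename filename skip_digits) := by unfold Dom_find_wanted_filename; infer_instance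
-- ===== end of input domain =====

-- B replaces A's fused scan/counter/break loop by collect-all-digit-positions then index (alternative decomposition, same cost).

-- ===== PORT A =====
-- loop of A: state is (remaining enumerate pairs, skip_digits, wanted); break returns filename[i:]
def findWantedLoop (filename : String) : List (Int × Char) → Int → String → String
  | [], _, wanted => wanted
  | (i, c) :: rest, skip, wanted =>
    if PySem.Chars.isdigit c then
      if skip < 1 then PySem.Str.slice filename (some i) none
      else findWantedLoop filename rest (skip - 1) wanted
    else findWantedLoop filename rest skip wanted

def find_wanted_filename (filename : String) (skip_digits : Int) : String :=
  findWantedLoop filename (PySem.List.enumerate filename.toList 0) skip_digits filename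

-- ===== PORT B =====
def find_wanted_filename_alt (filename : String) (skip_digits : Int) : String :=
  let positions : List Int :=
    ((PySem.List.enumerate filename.toList 0).filter (fun p => PySem.Chars.isdigit p.2)).map (·.1)
  let idx : Int := if skip_digits ≥ 1 then skip_digits else 0
  if idx < (positions.length : Int) then
    PySem.Str.slice filename (some (positions.getD idx.toNat 0)) none
  else filename

-- ===== PRECONDITION & SPEC =====
def Spec_find_wanted_filename (filename : String) (skip_digits : Int) (out : String) : Prop := out = find_wanted_filename_alt filename skip_digits
instance (filename : String) (skip_digits : Int) (out : String) : Decidable (Spec_find_wanted_filename filename skip_digits out) := by unfold Spec_find_wanted_filename; infer_instance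

-- ===== CLAIM (what is proved, stated in full; the proofs are below) =====
def Claim_equal_find_wanted_filename : Prop := ∀ (filename : String) (skip_digits : Int), Dom_find_wanted_filename filename skip_digits → Spec_find_wanted_filename filename skip_digits (find_wanted_filename filename skip_digits)

-- ===== LEMMAS AND PROOFS =====

-- the loop of A computes B's collect-then-index value, for any pair list and any skip
theorem findWantedLoop_eq (filename : String) (l : List (Int × Char)) (skip : Int) :
    findWantedLoop filename l skip filename =
      (let ps : List Int := (l.filter (fun p => PySem.Chars.isdigit p.2)).map (fun x => x.1)
       let idx : Int := if skip ≥ 1 then skip else 0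
       if idx < (ps.length : Int) then
         PySem.Str.slice filename (some (ps.getD idx.toNat 0)) none
       else filename) := by
  induction l generalizing skip with
  | nil =>
    simp only [findWantedLoop, List.filter_nil, List.map_nil, List.length_nil]
    split_ifs with h1 <;> first | rfl | (exfalso; omega)
  | cons hd tl ih =>
    obtain ⟨i, c⟩ := hd
    by_cases hdg : PySem.Chars.isdigit c
    · have hL : (((i, c) :: tl).filter (fun p => PySem.Chars.isdigit p.2)).map (fun x => x.1)
          = i :: (tl.filter (fun p => PySem.Chars.isdigit p.2)).map (fun x => x.1) := by
        simp [hdg]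
      by_cases hs : skip < 1
      · have hloopsimp : findWantedLoop filename ((i, c) :: tl) skip filename
            = PySem.Str.slice filename (some i) none := by
          simp [findWantedLoop, hdg, hs]
        rw [hloopsimp]
        simp only [hL, List.length_cons]
        rw [if_neg (by omega : ¬ skip ≥ 1)]
        rw [if_pos (by push_cast; omega)]
        simp
      · have hstep : findWantedLoop filename ((i, c) :: tl) skip filename
            = findWantedLoop filename tl (skip - 1) filename := by
          simp [findWantedLoop, hdg, hs]
        rw [hstep, ih (skip - 1)]
        simp only [hL, List.length_cons]
        rw [show (if skip - 1 ≥ 1 then skip - 1 else 0) = skip - 1 from by omega]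
        rw [show (if skip ≥ 1 then skip else 0) = skip from by omega]
        by_cases hlt : (skip - 1 : Int) <
            (((tl.filter (fun p => PySem.Chars.isdigit p.2)).map (fun x => x.1)).length : Int)
        · rw [if_pos hlt, if_pos (by push_cast; push_cast at hlt; omega)]
          have hk : skip.toNat = (skip - 1).toNat + 1 := by omega
          rw [hk, List.getD_cons_succ]
        · rw [if_neg hlt, if_neg (by push_cast; push_cast at hlt; omega)]
    · have hstep : findWantedLoop filename ((i, c) :: tl) skip filename
          = findWantedLoop filename tl skip filename := by
        simp [findWantedLoop, hdg]
      rw [hstep, ih skip]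
      simp [hdg]

-- ===== VERDICT (by name: the statement is the Claim_ definition above) =====
theorem find_wanted_filename_spec : Claim_equal_find_wanted_filename := by
  intro filename skip_digits _
  unfold Spec_find_wanted_filename find_wanted_filename find_wanted_filename_alt
  exact findWantedLoop_eq filename _ skip_digits
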